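-- pv_equiv track=rewrite | github.com/tompickup23/ukdemographics | scripts/generate_data_reel.py | _parse_affixes
-- ===== SOURCE A (Python) =====
-- def _parse_affixes(value_str: str) -> tuple:
--     """Extract prefix (e.g. $) and suffix (e.g. %) from value string."""
--     prefix = ""
--     suffix = ""
--     for ch in value_str:
--         if ch.isdigit() or ch == ".":
--             break
--         prefix += ch
--
--     for ch in reversed(value_str):
--         if ch.isdigit() or ch == ".":
--             break
--         suffix = ch + suffix
--
--     # Don't include B/M/K as suffix - handled by format_counting_number
--     if suffix.upper().rstrip() in ("B", "M", "K"):
--         suffix = ""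
--
--     return prefix.strip(), suffix.strip()
-- ===== SOURCE B (Python) =====
-- import re
--
--
-- def _parse_affixes(value_str: str) -> tuple:
--     """Extract prefix (e.g. $) and suffix (e.g. %) from value string."""
--     m = re.match(r'[^0-9.]*', value_str)
--     prefix = m.group()
--     suffix = re.search(r'[^0-9.]*\Z', value_str).group()
--     if suffix.upper().rstrip() in ("B", "M", "K"):
--         suffix = ""
--     return prefix.strip(), suffix.strip()
-- ===== Notes on version B (the rewrite author's own statement) =====
-- stated objective: faster
-- what changed: Replaces the two character-accumulating loops (forward with break, reversed with string prepending) by two anchored regex extractions of the maximal non-digit/non-dot runs at the start and end; the B/M/K nullification and strip post-processing are unchanged.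
import Mathlib
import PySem

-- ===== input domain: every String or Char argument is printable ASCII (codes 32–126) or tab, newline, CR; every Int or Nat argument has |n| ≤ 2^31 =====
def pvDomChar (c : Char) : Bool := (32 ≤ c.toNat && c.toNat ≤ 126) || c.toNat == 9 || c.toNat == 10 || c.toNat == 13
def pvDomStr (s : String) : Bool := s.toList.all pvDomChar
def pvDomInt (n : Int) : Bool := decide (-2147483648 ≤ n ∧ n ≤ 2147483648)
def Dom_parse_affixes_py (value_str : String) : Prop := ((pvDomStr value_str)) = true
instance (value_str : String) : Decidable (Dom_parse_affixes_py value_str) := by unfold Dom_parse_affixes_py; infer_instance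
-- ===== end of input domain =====

-- B extracts the affixes with anchored regexes instead of A's two accumulating loops; same post-processing. Objective: idiomatic.

-- ===== PORT A =====
-- ch.isdigit() or ch == "."  (the loops' break condition)
def pvStop (c : Char) : Bool := PySem.Chars.isdigit c || c == '.'

-- forward loop: accumulate chars until the break condition fires
def pvALoopPre : List Char → List Char
  | [] => []
  | c :: cs => if pvStop c then [] else c :: pvALoopPre cs

-- reversed loop: suffix = ch + suffix until the break condition fires
def pvALoopSuf : List Char → List Char → List Char
  | acc, [] => acc
  | acc, c :: cs => if pvStop c then acc else pvALoopSuf (c :: acc) cs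

-- shared post-processing (identical lines in A and B): B/M/K nullification, then .strip()
def pvFinish (pre suf : List Char) : String × String :=
  let suf :=
    if PySem.Chars.rstrip (PySem.Chars.upper suf) = ['B'] ∨
       PySem.Chars.rstrip (PySem.Chars.upper suf) = ['M'] ∨
       PySem.Chars.rstrip (PySem.Chars.upper suf) = ['K'] then [] else suf
  (String.ofList (PySem.Chars.strip pre), String.ofList (PySem.Chars.strip suf))

def parse_affixes_py (value_str : String) : String × String :=
  let pre := pvALoopPre value_str.toList
  let suf := pvALoopSuf [] value_str.toList.reverse
  pvFinish pre suf

-- ===== PORT B =====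
-- re.match(r'[^0-9.]*', s): maximal run of non-stop chars anchored at the start
-- re.search(r'[^0-9.]*\Z', s): maximal run of non-stop chars anchored at the end
def parse_affixes_py_alt (value_str : String) : String × String :=
  let pre := value_str.toList.takeWhile (fun c => !pvStop c)
  let suf := (value_str.toList.reverse.takeWhile (fun c => !pvStop c)).reverse
  pvFinish pre suf

-- ===== PRECONDITION & SPEC =====
def Spec_parse_affixes_py (value_str : String) (out : String × String) : Prop := out = parse_affixes_py_alt value_str
instance (value_str : String) (out : String × String) : Decidable (Spec_parse_affixes_py value_str out) := by unfold Spec_parse_affixes_py; infer_instance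

-- ===== CLAIM (what is proved, stated in full; the proofs are below) =====
def Claim_equal_parse_affixes_py : Prop := ∀ (value_str : String), Dom_parse_affixes_py value_str → Spec_parse_affixes_py value_str (parse_affixes_py value_str)

-- ===== LEMMAS AND PROOFS =====
theorem pvALoopPre_eq (l : List Char) : pvALoopPre l = l.takeWhile (fun c => !pvStop c) := by
  induction l with
  | nil => rfl
  | cons c cs ih =>
    simp only [pvALoopPre, List.takeWhile]
    cases h : pvStop c <;> simp [ih]

theorem pvALoopSuf_eq (l acc : List Char) :
    pvALoopSuf acc l = (l.takeWhile (fun c => !pvStop c)).reverse ++ acc := by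
  induction l generalizing acc with
  | nil => rfl
  | cons c cs ih =>
    simp only [pvALoopSuf, List.takeWhile]
    cases h : pvStop c <;> simp [ih]

-- ===== VERDICT (by name: the statement is the Claim_ definition above) =====
theorem parse_affixes_py_spec : Claim_equal_parse_affixes_py := by
  intro s _
  unfold Spec_parse_affixes_py parse_affixes_py parse_affixes_py_alt
  rw [pvALoopPre_eq, pvALoopSuf_eq]
  simp
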